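-- pv_equiv track=rewrite | github.com/yogin16/agnoclaw | src/agnoclaw/runtime/guardrails.py | _host_in_set
-- ===== SOURCE A (Python) =====
-- from typing import Any, Iterable
--
-- def _host_in_set(host: str, patterns: Iterable[str]) -> bool:
--     host_l = host.lower().strip(".")
--     for pattern in patterns:
--         p = pattern.lower().strip()
--         if not p:
--             continue
--         if p.startswith("*."):
--             suffix = p[2:]
--             if host_l == suffix or host_l.endswith(f".{suffix}"):
--                 return True
--         elif host_l == p:
--             return True
--     return False
-- ===== SOURCE B (Python) =====
-- def _host_in_set(host, patterns):
--     # One pass over patterns builds two indexes: exact names and wildcard suffixes.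
--     exact = set()
--     wild = set()
--     for pattern in patterns:
--         p = pattern.lower().strip()
--         if not p:
--             continue
--         if p.startswith("*."):
--             wild.add(p[2:])
--         else:
--             exact.add(p)
--     host_l = host.lower().strip(".")
--     if host_l in exact or host_l in wild:
--         return True
--     # every suffix of host_l that starts right after a dot
--     tails = {host_l[i + 1:] for i, c in enumerate(host_l) if c == "."}
--     return not wild.isdisjoint(tails)
-- ===== Notes on version B (the rewrite author's own statement) =====
-- stated objective: alternative
-- what changed: B replaces A's per-pattern wildcard test (equality or endswith per pattern, with early return) by a single index-building pass that splits patterns into an exact-name set and a wildcard-suffix set, then probes the host and its after-dot suffixes against those sets.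
import Mathlib
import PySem

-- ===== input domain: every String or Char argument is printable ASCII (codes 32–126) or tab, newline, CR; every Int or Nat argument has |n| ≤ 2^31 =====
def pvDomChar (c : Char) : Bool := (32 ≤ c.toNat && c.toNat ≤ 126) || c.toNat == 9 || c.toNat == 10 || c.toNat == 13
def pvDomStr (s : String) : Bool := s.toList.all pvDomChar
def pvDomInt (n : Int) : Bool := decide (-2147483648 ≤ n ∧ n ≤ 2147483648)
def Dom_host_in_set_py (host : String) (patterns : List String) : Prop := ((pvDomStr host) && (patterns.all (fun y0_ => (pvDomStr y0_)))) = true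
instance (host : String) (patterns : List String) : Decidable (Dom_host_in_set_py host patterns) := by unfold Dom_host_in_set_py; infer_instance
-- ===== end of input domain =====

-- B replaces A's per-pattern wildcard test with a one-pass index build (exact set + wildcard-suffix set)
-- followed by a suffix probe of the host; objective: alternative decomposition, same behaviour.

-- ===== PORT A =====
-- the for-loop of _host_in_set with its early returns
def pvLoopA (host_l : String) : List String → Bool
  | [] => false
  | pattern :: rest =>
    let p := PySem.Str.strip (PySem.Str.lower pattern)
    if p == "" then pvLoopA host_l rest
    else if PySem.Str.startswith p "*." then
      let suffix := PySem.Str.slice p (some 2) none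
      if host_l == suffix || PySem.Str.endswith host_l ("." ++ suffix) then true
      else pvLoopA host_l rest
    else if host_l == p then true
    else pvLoopA host_l rest

def host_in_set_py (host : String) (patterns : List String) : Bool :=
  let host_l := PySem.Str.stripChars (PySem.Str.lower host) "."
  pvLoopA host_l patterns

-- ===== PORT B =====
-- one pass over patterns: (exact names, wildcard suffixes)
def pvBuildSets : List String → PySem.Set String × PySem.Set String → PySem.Set String × PySem.Set String
  | [], ew => ew
  | pattern :: rest, ew =>
    let p := PySem.Str.strip (PySem.Str.lower pattern)
    pvBuildSets rest
      (if p == "" then ew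
       else if PySem.Str.startswith p "*." then (ew.1, PySem.Set.add ew.2 (PySem.Str.slice p (some 2) none))
       else (PySem.Set.add ew.1 p, ew.2))

-- {host_l[i+1:] for i, c in enumerate(host_l) if c == "."}: every suffix starting right after a dot
def pvTailsAfterDot : List Char → List String
  | [] => []
  | c :: rest => if c = '.' then String.ofList rest :: pvTailsAfterDot rest else pvTailsAfterDot rest

def host_in_set_py_alt (host : String) (patterns : List String) : Bool :=
  let ew := pvBuildSets patterns (PySem.Set.empty, PySem.Set.empty)
  let host_l := PySem.Str.stripChars (PySem.Str.lower host) "."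
  if PySem.Set.contains ew.1 host_l || PySem.Set.contains ew.2 host_l then true
  else
    let tails := PySem.Set.ofList (pvTailsAfterDot host_l.toList)
    !(PySem.Set.isdisjoint ew.2 tails)

-- ===== PRECONDITION & SPEC =====
def Spec_host_in_set_py (host : String) (patterns : List String) (out : Bool) : Prop := out = host_in_set_py_alt host patterns
instance (host : String) (patterns : List String) (out : Bool) : Decidable (Spec_host_in_set_py host patterns out) := by unfold Spec_host_in_set_py; infer_instance

-- ===== CLAIM (what is proved, stated in full; the proofs are below) =====
def Claim_equal_host_in_set_py : Prop := ∀ (host : String) (patterns : List String), Dom_host_in_set_py host patterns → Spec_host_in_set_py host patterns (host_in_set_py host patterns)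

-- ===== LEMMAS AND PROOFS =====

-- per-pattern match predicate (p already lowered/stripped)
def pvMatch (host_l p : String) : Bool :=
  if p == "" then false
  else if PySem.Str.startswith p "*." then
    host_l == PySem.Str.slice p (some 2) none
      || PySem.Str.endswith host_l ("." ++ PySem.Str.slice p (some 2) none)
  else host_l == p

lemma pvLoopA_eq_any (host_l : String) (pats : List String) :
    pvLoopA host_l pats = pats.any (fun pat => pvMatch host_l (PySem.Str.strip (PySem.Str.lower pat))) := by
  induction pats with
  | nil => rfl
  | cons pat rest ih =>
    simp only [pvLoopA, pvMatch, List.any_cons, ih]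
    split_ifs <;> simp_all

lemma mem_pvTailsAfterDot (s : String) (l : List Char) :
    s ∈ pvTailsAfterDot l ↔ ('.' :: s.toList) <:+ l := by
  induction l with
  | nil => simp [pvTailsAfterDot]
  | cons c rest ih =>
    simp only [pvTailsAfterDot]
    rw [List.suffix_cons_iff]
    rcases eq_or_ne c '.' with rfl | hc
    · rw [if_pos rfl, List.mem_cons, ih]
      constructor
      · rintro (h | h)
        · subst h; left; simp
        · right; exact h
      · rintro (h | h)
        · left
          have hrest : s.toList = rest := by injection h
          rw [← hrest]; simp
        · right; exact h
    · rw [if_neg hc, ih]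
      constructor
      · exact Or.inr
      · rintro (h | h)
        · exact absurd (by injection h : '.' = c).symm hc
        · exact h

lemma endswith_iff_mem_tails (host_l s : String) :
    PySem.Str.endswith host_l ("." ++ s) = true ↔ s ∈ pvTailsAfterDot host_l.toList := by
  rw [mem_pvTailsAfterDot]
  have : ("." ++ s).toList = '.' :: s.toList := by simp
  simp [PySem.Str.endswith, PySem.Chars.endswith_iff, this]

lemma mem_pvBuildSets_fst (pats : List String) (ew : PySem.Set String × PySem.Set String) (x : String) :
    x ∈ (pvBuildSets pats ew).1 ↔ x ∈ ew.1 ∨ ∃ pat ∈ pats,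
      ¬ PySem.Str.strip (PySem.Str.lower pat) = "" ∧
      PySem.Str.startswith (PySem.Str.strip (PySem.Str.lower pat)) "*." = false ∧
      x = PySem.Str.strip (PySem.Str.lower pat) := by
  induction pats generalizing ew with
  | nil => simp [pvBuildSets]
  | cons pat rest ih =>
    simp only [pvBuildSets, ih, List.mem_cons]
    by_cases h1 : (PySem.Str.strip (PySem.Str.lower pat) == "") = true
    · rw [if_pos h1]
      rw [beq_iff_eq] at h1
      constructor
      · rintro (h | ⟨q, hq, hp⟩)
        · exact Or.inl h
        · exact Or.inr ⟨q, Or.inr hq, hp⟩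
      · rintro (h | ⟨q, rfl | hq, hne, hsw, hx⟩)
        · exact Or.inl h
        · exact absurd h1 hne
        · exact Or.inr ⟨q, hq, hne, hsw, hx⟩
    · rw [if_neg h1]
      rw [beq_iff_eq] at h1
      by_cases h2 : PySem.Str.startswith (PySem.Str.strip (PySem.Str.lower pat)) "*." = true
      · rw [if_pos h2]
        constructor
        · rintro (h | ⟨q, hq, hp⟩)
          · exact Or.inl h
          · exact Or.inr ⟨q, Or.inr hq, hp⟩
        · rintro (h | ⟨q, rfl | hq, hne, hsw, hx⟩)
          · exact Or.inl h
          · rw [h2] at hsw; exact absurd hsw (by simp)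
          · exact Or.inr ⟨q, hq, hne, hsw, hx⟩
      · rw [if_neg h2]
        rw [Bool.not_eq_true] at h2
        constructor
        · rintro (h | ⟨q, hq, hp⟩)
          · rcases (PySem.Set.mem_add _ _ _).mp h with h | h
            · exact Or.inl h
            · exact Or.inr ⟨pat, Or.inl rfl, h1, h2, h⟩
          · exact Or.inr ⟨q, Or.inr hq, hp⟩
        · rintro (h | ⟨q, rfl | hq, hne, hsw, hx⟩)
          · exact Or.inl ((PySem.Set.mem_add _ _ _).mpr (Or.inl h))
          · exact Or.inl ((PySem.Set.mem_add _ _ _).mpr (Or.inr hx))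
          · exact Or.inr ⟨q, hq, hne, hsw, hx⟩

lemma mem_pvBuildSets_snd (pats : List String) (ew : PySem.Set String × PySem.Set String) (x : String) :
    x ∈ (pvBuildSets pats ew).2 ↔ x ∈ ew.2 ∨ ∃ pat ∈ pats,
      ¬ PySem.Str.strip (PySem.Str.lower pat) = "" ∧
      PySem.Str.startswith (PySem.Str.strip (PySem.Str.lower pat)) "*." = true ∧
      x = PySem.Str.slice (PySem.Str.strip (PySem.Str.lower pat)) (some 2) none := by
  induction pats generalizing ew with
  | nil => simp [pvBuildSets]
  | cons pat rest ih =>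
    simp only [pvBuildSets, ih, List.mem_cons]
    by_cases h1 : (PySem.Str.strip (PySem.Str.lower pat) == "") = true
    · rw [if_pos h1]
      rw [beq_iff_eq] at h1
      constructor
      · rintro (h | ⟨q, hq, hp⟩)
        · exact Or.inl h
        · exact Or.inr ⟨q, Or.inr hq, hp⟩
      · rintro (h | ⟨q, rfl | hq, hne, hsw, hx⟩)
        · exact Or.inl h
        · exact absurd h1 hne
        · exact Or.inr ⟨q, hq, hne, hsw, hx⟩
    · rw [if_neg h1]
      rw [beq_iff_eq] at h1
      by_cases h2 : PySem.Str.startswith (PySem.Str.strip (PySem.Str.lower pat)) "*." = true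
      · rw [if_pos h2]
        constructor
        · rintro (h | ⟨q, hq, hp⟩)
          · rcases (PySem.Set.mem_add _ _ _).mp h with h | h
            · exact Or.inl h
            · exact Or.inr ⟨pat, Or.inl rfl, h1, h2, h⟩
          · exact Or.inr ⟨q, Or.inr hq, hp⟩
        · rintro (h | ⟨q, rfl | hq, hne, hsw, hx⟩)
          · exact Or.inl ((PySem.Set.mem_add _ _ _).mpr (Or.inl h))
          · exact Or.inl ((PySem.Set.mem_add _ _ _).mpr (Or.inr hx))
          · exact Or.inr ⟨q, hq, hne, hsw, hx⟩
      · rw [if_neg h2]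
        rw [Bool.not_eq_true] at h2
        constructor
        · rintro (h | ⟨q, hq, hp⟩)
          · exact Or.inl h
          · exact Or.inr ⟨q, Or.inr hq, hp⟩
        · rintro (h | ⟨q, rfl | hq, hne, hsw, hx⟩)
          · exact Or.inl h
          · rw [h2] at hsw; exact absurd hsw (by simp)
          · exact Or.inr ⟨q, hq, hne, hsw, hx⟩

-- ===== VERDICT (by name: the statement is the Claim_ definition above) =====
theorem host_in_set_py_spec : Claim_equal_host_in_set_py := by
  intro host patterns _
  simp only [Spec_host_in_set_py, host_in_set_py, host_in_set_py_alt]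
  set host_l := PySem.Str.stripChars (PySem.Str.lower host) "." with hhl
  set E := (pvBuildSets patterns (PySem.Set.empty, PySem.Set.empty)).1 with hE
  set W := (pvBuildSets patterns (PySem.Set.empty, PySem.Set.empty)).2 with hW
  set T := pvTailsAfterDot host_l.toList with hT
  rw [pvLoopA_eq_any, Bool.eq_iff_iff, List.any_eq_true]
  constructor
  · rintro ⟨pat, hmem, hmatch⟩
    simp only [pvMatch] at hmatch
    split_ifs at hmatch with h1 h2
    · rw [Bool.or_eq_true] at hmatch
      rcases hmatch with hc | hc
      · -- host_l equals the wildcard suffix: host_l is in the wild set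
        have hw : host_l ∈ W := by
          rw [hW, mem_pvBuildSets_snd]
          exact Or.inr ⟨pat, hmem, by simpa using h1, h2, beq_iff_eq.mp hc⟩
        have hcond : (PySem.Set.contains E host_l || PySem.Set.contains W host_l) = true := by
          rw [(PySem.Set.contains_iff _ _).mpr hw]; simp
        rw [if_pos hcond]
      · -- the wildcard suffix is a dotted tail of host_l
        have hw : PySem.Str.slice (PySem.Str.strip (PySem.Str.lower pat)) (some 2) none ∈ W := by
          rw [hW, mem_pvBuildSets_snd]
          exact Or.inr ⟨pat, hmem, by simpa using h1, h2, rfl⟩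
        have ht := (endswith_iff_mem_tails host_l _).mp hc
        by_cases hg : (PySem.Set.contains E host_l || PySem.Set.contains W host_l) = true
        · rw [if_pos hg]
        · rw [if_neg hg, Bool.not_eq_true']
          rw [← Bool.not_eq_true]
          intro hd
          exact ((PySem.Set.isdisjoint_iff _ _).mp hd _ hw) ((PySem.Set.mem_ofList _ _).mpr (hT ▸ ht))
    · -- exact pattern: host_l is in the exact set
      have he : host_l ∈ E := by
        rw [hE, mem_pvBuildSets_fst]
        exact Or.inr ⟨pat, hmem, by simpa using h1, by simpa using h2, beq_iff_eq.mp hmatch⟩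
      have hcond : (PySem.Set.contains E host_l || PySem.Set.contains W host_l) = true := by
        rw [(PySem.Set.contains_iff _ _).mpr he]; simp
      rw [if_pos hcond]
  · intro hB
    by_cases hg : (PySem.Set.contains E host_l || PySem.Set.contains W host_l) = true
    · rw [Bool.or_eq_true] at hg
      rcases hg with hc | hc
      · rcases (hE ▸ mem_pvBuildSets_fst patterns _ host_l).mp ((PySem.Set.contains_iff _ _).mp hc)
          with h | ⟨pat, hmem, hp, hsw, hx⟩
        · exact absurd h List.not_mem_nil
        · refine ⟨pat, hmem, ?_⟩
          have hp' : ¬ (PySem.Str.strip (PySem.Str.lower pat) == "") = true := by simpa using hp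
          have hsw' : ¬ PySem.Str.startswith (PySem.Str.strip (PySem.Str.lower pat)) "*." = true := by
            intro h; rw [hsw] at h; exact Bool.noConfusion h
          simp only [pvMatch, if_neg hp', if_neg hsw', hx]
          simp
      · rcases (hW ▸ mem_pvBuildSets_snd patterns _ host_l).mp ((PySem.Set.contains_iff _ _).mp hc)
          with h | ⟨pat, hmem, hp, hsw, hx⟩
        · exact absurd h List.not_mem_nil
        · refine ⟨pat, hmem, ?_⟩
          have hp' : ¬ (PySem.Str.strip (PySem.Str.lower pat) == "") = true := by simpa using hp
          simp only [pvMatch, if_neg hp', if_pos hsw, hx]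
          simp
    · rw [if_neg hg, Bool.not_eq_true'] at hB
      have hex : ∃ x ∈ W, x ∈ PySem.Set.ofList T := by
        by_contra hno
        push Not at hno
        have hd := (PySem.Set.isdisjoint_iff _ _).mpr hno
        rw [hd] at hB
        exact absurd hB (by simp)
      rcases hex with ⟨x, hxW, hxT⟩
      rcases (hW ▸ mem_pvBuildSets_snd patterns _ x).mp hxW with h | ⟨pat, hmem, hp, hsw, hx⟩
      · exact absurd h List.not_mem_nil
      · refine ⟨pat, hmem, ?_⟩
        have ht : x ∈ T := (PySem.Set.mem_ofList _ _).mp hxT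
        have he := (endswith_iff_mem_tails host_l x).mpr (hT ▸ ht)
        have hp' : ¬ (PySem.Str.strip (PySem.Str.lower pat) == "") = true := by simpa using hp
        simp only [pvMatch, if_neg hp', if_pos hsw]
        rw [← hx, he]
        simp
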